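-- pv_equiv track=rewrite | github.com/satyakisikdar/Attributed-VRG | VRG/src/utils.py | node_matcher_strict
-- ===== SOURCE A (Python) =====
-- from typing import Dict
--
-- def node_matcher_strict(node_attr_1: Dict, node_attr_2: Dict) -> bool:
--     """
--     If node n1 in G1 are the same as node n2 in G2
--     :param node_attr_1: Dictionary of node attrs
--     :param node_attr_2:
--     :return:
--     """
--     # check if they have the same set of attributes
--     # only check if their b_deg are the same
--     same = set(node_attr_1.keys()) == set(node_attr_2.keys())
--     if same:
--         # check if the values are the same too
--         for key, val_1 in node_attr_1.items():
--             if key == 'actual_label':  # ignore actual_label attribute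
--                 continue
--             val_2 = node_attr_2[key]
--             if val_1 != val_2:  # if the values don't match, break
--                 same = False
--                 break
--     return same
-- ===== SOURCE B (Python) =====
-- def node_matcher_strict(node_attr_1, node_attr_2):
--     def normalize(d):
--         # fresh dict; 'actual_label' key kept but its value neutralized
--         return {k: (None if k == 'actual_label' else v) for k, v in d.items()}
--     return normalize(node_attr_1) == normalize(node_attr_2)
-- ===== Notes on version B (the rewrite author's own statement) =====
-- stated objective: simpler
-- what changed: B replaces A's explicit key-set comparison followed by a value loop with skip/break and indexing into the second dict by a single dict equality of the two dicts normalized so that the value under 'actual_label' (key kept) is a fixed sentinel.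
import Mathlib
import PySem

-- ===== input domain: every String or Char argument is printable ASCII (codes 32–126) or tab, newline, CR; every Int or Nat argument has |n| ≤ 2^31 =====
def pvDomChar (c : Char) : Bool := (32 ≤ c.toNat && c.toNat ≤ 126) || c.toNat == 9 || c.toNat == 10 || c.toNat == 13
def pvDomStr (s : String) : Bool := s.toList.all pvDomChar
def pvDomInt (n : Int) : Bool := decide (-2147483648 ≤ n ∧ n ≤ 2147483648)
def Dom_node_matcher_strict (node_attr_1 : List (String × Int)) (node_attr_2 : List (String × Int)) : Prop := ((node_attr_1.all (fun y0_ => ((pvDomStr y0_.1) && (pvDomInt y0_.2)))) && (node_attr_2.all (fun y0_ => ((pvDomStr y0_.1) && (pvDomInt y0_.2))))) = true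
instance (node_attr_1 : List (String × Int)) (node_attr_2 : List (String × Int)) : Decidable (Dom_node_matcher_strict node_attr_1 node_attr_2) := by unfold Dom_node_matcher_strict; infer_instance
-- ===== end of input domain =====

-- B normalizes both dicts ('actual_label' value replaced by a sentinel, key kept) and compares
-- them with one dict equality, instead of A's key-set check plus value loop with skip/break (objective: simpler).
-- Both dict arguments are modelled as the dict built from the association list (dict(pairs): later
-- duplicates overwrite), exactly what Python receives.

-- ===== PORT A =====
-- A's value loop: 'continue' on 'actual_label', 'same = False; break' on a mismatch.
-- The 'none' branch is unreachable where A runs this loop (equal key sets: node_attr_2[key] cannot raise).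
def pvLoopA (d2 : PySem.Dict String Int) : List (String × Int) → Bool
  | [] => true
  | (k, v) :: rest =>
      if k == "actual_label" then pvLoopA d2 rest
      else
        match d2.get? k with
        | some v2 => if v != v2 then false else pvLoopA d2 rest
        | none => false

def node_matcher_strict (node_attr_1 : List (String × Int)) (node_attr_2 : List (String × Int)) : Bool :=
  let d1 := PySem.Dict.ofList node_attr_1
  let d2 := PySem.Dict.ofList node_attr_2
  let same := PySem.Set.equal (PySem.Set.ofList d1.keys) (PySem.Set.ofList d2.keys)
  if same then pvLoopA d2 d1.items else same

-- ===== PORT B =====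
-- normalize(d): fresh dict, value under 'actual_label' becomes the sentinel None (key kept)
def pvNormalize (d : PySem.Dict String Int) : PySem.Dict String (Option Int) :=
  PySem.Dict.ofList (d.items.map (fun p => (p.1, if p.1 == "actual_label" then none else some p.2)))

-- Python's '==' on dicts: order-insensitive (same key set, same value at every key)
def pvPyDictEq (a : PySem.Dict String (Option Int)) (b : PySem.Dict String (Option Int)) : Bool :=
  PySem.Set.equal (PySem.Set.ofList a.keys) (PySem.Set.ofList b.keys)
    && a.keys.all (fun k => a.get? k == b.get? k)

def node_matcher_strict_alt (node_attr_1 : List (String × Int)) (node_attr_2 : List (String × Int)) : Bool :=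
  pvPyDictEq (pvNormalize (PySem.Dict.ofList node_attr_1)) (pvNormalize (PySem.Dict.ofList node_attr_2))

-- ===== PRECONDITION & SPEC =====
def Spec_node_matcher_strict (node_attr_1 : List (String × Int)) (node_attr_2 : List (String × Int)) (out : Bool) : Prop := out = node_matcher_strict_alt node_attr_1 node_attr_2
instance (node_attr_1 : List (String × Int)) (node_attr_2 : List (String × Int)) (out : Bool) : Decidable (Spec_node_matcher_strict node_attr_1 node_attr_2 out) := by unfold Spec_node_matcher_strict; infer_instance

-- ===== CLAIM (what is proved, stated in full; the proofs are below) =====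
def Claim_equal_node_matcher_strict : Prop := ∀ (node_attr_1 : List (String × Int)) (node_attr_2 : List (String × Int)), Dom_node_matcher_strict node_attr_1 node_attr_2 → Spec_node_matcher_strict node_attr_1 node_attr_2 (node_matcher_strict node_attr_1 node_attr_2)

-- ===== LEMMAS AND PROOFS =====

-- A's break/continue loop is an 'all' over the items
theorem pvLoopA_eq_all (d2 : PySem.Dict String Int) (l : List (String × Int)) :
    pvLoopA d2 l = l.all (fun p => p.1 == "actual_label" || d2.get? p.1 == some p.2) := by
  induction l with
  | nil => rfl
  | cons p rest ih =>
      obtain ⟨k, v⟩ := p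
      simp only [pvLoopA, List.all_cons, ih]
      by_cases hk : (k == "actual_label") = true
      · simp [hk]
      · simp only [hk, Bool.false_or]
        cases h : d2.get? k with
        | none => simp
        | some v2 =>
            by_cases hv : v = v2
            · simp [hv]
            · simp [bne, beq_iff_eq, hv, (Ne.symm hv : v2 ≠ v)]

-- dict(pairs) with pairwise-distinct keys keeps the pairs as its items
theorem pv_ofList_eq_mk {κ ν : Type} [BEq κ] [LawfulBEq κ] (ps : List (κ × ν))
    (h : (ps.map Prod.fst).Nodup) : PySem.Dict.ofList ps = PySem.Dict.mk ps := by
  apply PySem.Dict.ext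
  have hfresh : ∀ a ∈ ps, (PySem.Dict.empty : PySem.Dict κ ν).contains a.1 = false := by
    intro a _; simp [pysem]
  have hfold := PySem.Dict.items_foldl_insert_fresh ps Prod.fst Prod.snd PySem.Dict.empty hfresh h
  have hdef : PySem.Dict.ofList ps
      = List.foldl (fun (d : PySem.Dict κ ν) (a : κ × ν) => d.insert a.1 a.2) PySem.Dict.empty ps := rfl
  rw [hdef, hfold]
  simp [PySem.Dict.empty]

theorem pvNormalize_eq_mk (d : PySem.Dict String Int) (hnd : d.keys.Nodup) :
    pvNormalize d = PySem.Dict.mk (d.items.map (fun p => (p.1, if p.1 == "actual_label" then none else some p.2))) := by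
  apply pv_ofList_eq_mk
  simpa [List.map_map, Function.comp, PySem.Dict.keys] using hnd

theorem pvNormalize_keys (d : PySem.Dict String Int) (hnd : d.keys.Nodup) :
    (pvNormalize d).keys = d.keys := by
  rw [pvNormalize_eq_mk d hnd]
  simp [PySem.Dict.keys, List.map_map, Function.comp]

-- first-match lookup in a key-preserving mapped literal dict
theorem pv_get?_mk_map (l : List (String × Int)) (k : String) (g : String × Int → Option Int) :
    (PySem.Dict.mk (l.map (fun p => (p.1, g p)))).get? k
      = (l.find? (fun p => p.1 == k)).map g := by
  induction l with
  | nil => rfl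
  | cons p rest ih =>
      rw [List.map_cons, PySem.Dict.get?_mk_cons, List.find?_cons]
      by_cases h : (p.1 == k) = true
      · simp [h]
      · simp [h, ih]

theorem pvNormalize_get? (d : PySem.Dict String Int) (hnd : d.keys.Nodup) (k : String) :
    (pvNormalize d).get? k
      = (d.get? k).map (fun v => if k == "actual_label" then none else some v) := by
  rw [pvNormalize_eq_mk d hnd, pv_get?_mk_map]
  have hdef : d.get? k = (d.items.find? (fun p => p.1 == k)).map Prod.snd := rfl
  rw [hdef]
  cases h : d.items.find? (fun p : String × Int => p.1 == k) with
  | none => rfl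
  | some q =>
      have hq' : q.1 = k := by simpa using (List.find?_some h)
      simp [hq']

-- the two bodies agree on any two dicts with distinct keys
theorem pv_main (d1 d2 : PySem.Dict String Int) (h1 : d1.keys.Nodup) (h2 : d2.keys.Nodup) :
    (if PySem.Set.equal (PySem.Set.ofList d1.keys) (PySem.Set.ofList d2.keys)
      then pvLoopA d2 d1.items
      else PySem.Set.equal (PySem.Set.ofList d1.keys) (PySem.Set.ofList d2.keys))
    = pvPyDictEq (pvNormalize d1) (pvNormalize d2) := by
  rw [PySem.Set.ofList_eq_self_of_nodup _ h1, PySem.Set.ofList_eq_self_of_nodup _ h2]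
  unfold pvPyDictEq
  rw [pvNormalize_keys d1 h1, pvNormalize_keys d2 h2,
    PySem.Set.ofList_eq_self_of_nodup _ h1, PySem.Set.ofList_eq_self_of_nodup _ h2]
  by_cases hset : PySem.Set.equal d1.keys d2.keys = true
  · rw [hset, if_pos rfl, Bool.true_and, pvLoopA_eq_all]
    have hkeys : ∀ k, k ∈ d1.keys ↔ k ∈ d2.keys := (PySem.Set.equal_iff _ _).1 hset
    have hmap : d1.keys.all (fun k => (pvNormalize d1).get? k == (pvNormalize d2).get? k)
        = d1.items.all (fun p => (pvNormalize d1).get? p.1 == (pvNormalize d2).get? p.1) := by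
      show (d1.items.map Prod.fst).all _ = _
      rw [List.all_map]
      simp [Function.comp_def]
    rw [hmap]
    have hpt : ∀ p ∈ d1.items,
        (p.1 == "actual_label" || d2.get? p.1 == some p.2)
          = ((pvNormalize d1).get? p.1 == (pvNormalize d2).get? p.1) := by
      rintro ⟨k, v⟩ hp
      have hg1 : d1.get? k = some v := PySem.Dict.get?_of_mem_items d1 hp h1
      have hk1 : k ∈ d1.keys := List.mem_map.2 ⟨(k, v), hp, rfl⟩
      have hk2 : k ∈ d2.keys := (hkeys k).1 hk1
      have hc2 : (d2.get? k).isSome = true := by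
        rw [← PySem.Dict.contains_eq_isSome_get?]
        exact (PySem.Dict.contains_iff_mem_keys d2 k).2 hk2
      obtain ⟨v2, hg2⟩ := Option.isSome_iff_exists.1 hc2
      rw [pvNormalize_get? d1 h1 k, pvNormalize_get? d2 h2 k, hg1, hg2]
      by_cases hk : (k == "actual_label") = true
      · simp [hk]
      · simp only [hk, Bool.false_or, Option.map_some]
        simp
        constructor <;> (intro h; omega)
    rw [Bool.eq_iff_iff, List.all_eq_true, List.all_eq_true]
    exact ⟨fun h p hp => (hpt p hp) ▸ h p hp, fun h p hp => (hpt p hp).symm ▸ h p hp⟩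
  · simp [hset]

-- ===== VERDICT (by name: the statement is the Claim_ definition above) =====
theorem node_matcher_strict_spec : Claim_equal_node_matcher_strict := by
  intro l1 l2 _
  show node_matcher_strict l1 l2 = node_matcher_strict_alt l1 l2
  unfold node_matcher_strict node_matcher_strict_alt
  exact pv_main _ _ (PySem.Dict.nodup_keys_ofList l1) (PySem.Dict.nodup_keys_ofList l2)
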